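-- pv_equiv track=rewrite | github.com/kuznetsovvj/education | algorithms/codeforces/514a.py | check
-- ===== SOURCE A (Python) =====
-- def check(t):
--     n = 1
--     res = 0
--     while t > 0:
--         m = t % 10
--         # проверить, что разряд не последний, чтобы не было лидирующих нулей
--         if t // 10 > 0:
--             if m >= 5:
--                 res += (9 - m) * n
--             else:
--                 res += m * n
--         else:
--             if m >= 5 and m < 9:
--                 res += (9 - m) * n
--             else:
--                 res += m * n
--         t = t // 10
--         n = n * 10
--     return res
-- ===== SOURCE B (Python) =====
-- def check(t):
--     if t <= 0:
--         return 0
--     ds = []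
--     while t > 0:
--         ds.append(t % 10)
--         t //= 10
--     ds.reverse()
--     lead = ds[0]
--     acc = lead if (lead < 5 or lead == 9) else 9 - lead
--     for d in ds[1:]:
--         acc = acc * 10 + min(d, 9 - d)
--     return acc
-- ===== Notes on version B (the rewrite author's own statement) =====
-- stated objective: alternative
-- what changed: B extracts the digit list once, reverses it, handles the leading digit outside the loop, and folds most-significant-first with acc = acc*10 + min(d, 9-d), instead of A's single least-significant-first loop that maintains a place-value multiplier and re-tests 'is this the leading digit' on every iteration.
import Mathlib
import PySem

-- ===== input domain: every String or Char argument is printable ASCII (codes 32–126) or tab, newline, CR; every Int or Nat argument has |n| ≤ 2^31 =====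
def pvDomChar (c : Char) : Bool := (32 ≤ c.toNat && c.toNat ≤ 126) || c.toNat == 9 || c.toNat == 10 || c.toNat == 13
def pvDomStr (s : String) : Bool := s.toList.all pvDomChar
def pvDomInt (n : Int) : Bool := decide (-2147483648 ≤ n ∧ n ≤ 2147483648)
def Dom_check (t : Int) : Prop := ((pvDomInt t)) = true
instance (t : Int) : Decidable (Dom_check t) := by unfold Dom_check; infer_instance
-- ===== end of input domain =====

-- B re-implements A's least-significant-first place-value loop as: extract the digit
-- list, reverse it, map the leading digit once, then fold most-significant-first with
-- acc = acc*10 + min(d, 9-d); an alternative of the same cost (objective: alternative).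

-- termination helper cited by both ports' recursions
theorem pvFloordiv10_toNat_lt (t : Int) (h : 0 < t) :
    (PySem.Int.floordiv t 10).toNat < t.toNat := by
  rw [PySem.Int.floordiv_eq_ediv_of_pos (by omega : (0:Int) < 10)]
  omega

-- ===== PORT A =====
def checkLoop (t n res : Int) : Int :=
  if h : 0 < t then
    let m := PySem.Int.mod t 10
    let res' :=
      if 0 < PySem.Int.floordiv t 10 then
        if 5 ≤ m then res + (9 - m) * n else res + m * n
      else
        if 5 ≤ m ∧ m < 9 then res + (9 - m) * n else res + m * n
    checkLoop (PySem.Int.floordiv t 10) (n * 10) res'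
  else res
termination_by t.toNat
decreasing_by exact pvFloordiv10_toNat_lt t h

def check (t : Int) : Int := checkLoop t 1 0

-- ===== PORT B =====
-- while t > 0: ds.append(t % 10); t //= 10   (digits, least significant first)
def digitsLSB (t : Int) : List Int :=
  if h : 0 < t then PySem.Int.mod t 10 :: digitsLSB (PySem.Int.floordiv t 10) else []
termination_by t.toNat
decreasing_by exact pvFloordiv10_toNat_lt t h

def check_alt (t : Int) : Int :=
  if t ≤ 0 then 0
  else
    match (digitsLSB t).reverse with
    | [] => 0  -- unreachable: the digit list of a positive t is nonempty
    | lead :: rest =>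
        rest.foldl (fun acc d => acc * 10 + min d (9 - d))
          (if lead < 5 ∨ lead = 9 then lead else 9 - lead)

-- ===== PRECONDITION & SPEC =====
def Spec_check (t : Int) (out : Int) : Prop := out = check_alt t
instance (t : Int) (out : Int) : Decidable (Spec_check t out) := by unfold Spec_check; infer_instance

-- ===== CLAIM (what is proved, stated in full; the proofs are below) =====
def Claim_equal_check : Prop := ∀ (t : Int), Dom_check t → Spec_check t (check t)

-- ===== LEMMAS AND PROOFS =====

theorem checkLoop_zero (t : Int) (h : ¬ 0 < t) : checkLoop t 1 0 = 0 := by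
  rw [checkLoop]; simp [h]

theorem checkLoop_scale : ∀ (k : Nat) (t : Int), t.toNat ≤ k →
    ∀ n res, checkLoop t n res = res + n * checkLoop t 1 0 := by
  intro k
  induction k with
  | zero =>
    intro t ht n res
    have h : ¬ 0 < t := by omega
    rw [checkLoop, checkLoop_zero t h]
    simp [h]
  | succ k ih =>
    intro t ht n res
    by_cases h : 0 < t
    · conv_lhs => rw [checkLoop]
      conv_rhs => rw [checkLoop]
      simp only [dif_pos h]
      have hd : PySem.Int.floordiv t 10 = t / 10 :=
        PySem.Int.floordiv_eq_ediv_of_pos (by omega)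
      have h2 : (t / 10).toNat ≤ k := by omega
      rw [hd]
      conv_rhs => rw [ih _ h2]
      conv_lhs => rw [ih _ h2]
      split_ifs <;> ring
    · rw [checkLoop, checkLoop_zero t h]
      simp [h]

theorem digitsLSB_pos (t : Int) (h : 0 < t) :
    digitsLSB t = PySem.Int.mod t 10 :: digitsLSB (PySem.Int.floordiv t 10) := by
  rw [digitsLSB]; simp [h]

theorem digitsLSB_nonpos (t : Int) (h : ¬ 0 < t) : digitsLSB t = [] := by
  rw [digitsLSB]; simp [h]

theorem check_alt_step (t : Int) (h : 10 ≤ t) :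
    check_alt t = check_alt (t / 10) * 10 + min (t % 10) (9 - t % 10) := by
  have hd : PySem.Int.floordiv t 10 = t / 10 :=
    PySem.Int.floordiv_eq_ediv_of_pos (by omega)
  have hm : PySem.Int.mod t 10 = t % 10 :=
    PySem.Int.mod_eq_emod_of_pos (by omega)
  have hq : 0 < t / 10 := by omega
  have hne : (digitsLSB (t / 10)).reverse ≠ [] := by
    rw [digitsLSB_pos _ hq]; simp
  obtain ⟨lead, rest, hrev⟩ := List.exists_cons_of_ne_nil hne
  have hrev' : (digitsLSB t).reverse
      = lead :: (rest ++ [t % 10]) := by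
    rw [digitsLSB_pos t (by omega), hd, hm, List.reverse_cons, hrev]
    rfl
  unfold check_alt
  rw [if_neg (by omega : ¬ t ≤ 0), if_neg (by omega : ¬ t / 10 ≤ 0), hrev', hrev]
  simp [List.foldl_append]

theorem check_eq_alt : ∀ (k : Nat) (t : Int), t.toNat ≤ k → check t = check_alt t := by
  intro k
  induction k with
  | zero =>
    intro t ht
    have h : ¬ 0 < t := by omega
    unfold check check_alt
    rw [checkLoop]
    simp [h, show t ≤ 0 by omega]
  | succ k ih =>
    intro t ht
    by_cases h : 0 < t
    · have hd : PySem.Int.floordiv t 10 = t / 10 :=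
        PySem.Int.floordiv_eq_ediv_of_pos (by omega)
      have hm : PySem.Int.mod t 10 = t % 10 :=
        PySem.Int.mod_eq_emod_of_pos (by omega)
      by_cases hten : 10 ≤ t
      · -- step case: last digit is not the leading one
        have hq : 0 < t / 10 := by omega
        have h2 : (t / 10).toNat ≤ k := by omega
        have hA : check t
            = (if 5 ≤ t % 10 then 9 - t % 10 else t % 10) + 10 * check (t / 10) := by
          unfold check
          rw [checkLoop]
          simp only [dif_pos h, hd, hm, if_pos hq]
          rw [checkLoop_scale k _ h2]
          split_ifs <;> ring
        rw [hA, ih _ h2, check_alt_step t hten]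
        have hmb : 0 ≤ t % 10 ∧ t % 10 < 10 := by omega
        split_ifs <;> omega
      · -- single digit: 0 < t < 10
        have hq : t / 10 = 0 := by omega
        unfold check check_alt
        rw [checkLoop, checkLoop]
        simp only [dif_pos h, hd, hm, hq]
        rw [digitsLSB_pos t h, hd, hm, hq, digitsLSB_nonpos 0 (by omega)]
        have hmt : t % 10 = t := by omega
        simp only [hmt, List.reverse_cons, List.reverse_nil, List.nil_append,
          List.foldl_nil]
        rw [dif_neg (by omega : ¬ (0:Int) < 0)]
        simp only [if_neg (by omega : ¬ t ≤ 0)]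
        split_ifs <;> omega
    · unfold check check_alt
      rw [checkLoop]
      simp [h, show t ≤ 0 by omega]

-- ===== VERDICT (by name: the statement is the Claim_ definition above) =====
theorem check_spec : Claim_equal_check := by
  intro t _
  unfold Spec_check
  exact check_eq_alt t.toNat t le_rfl
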